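-- pv_equiv track=rewrite | github.com/ToderitaLoredana/AA | Lab2/sorting_lab.py | _gen_qs
-- ===== SOURCE A (Python) =====
-- def _gen_qs(arr, low, high):
--     if low < high:
--         pivot = arr[high]
--         i = low - 1
--         for j in range(low, high):
--             if arr[j] <= pivot:
--                 i += 1
--                 arr[i], arr[j] = arr[j], arr[i]
--                 yield arr.copy(), i, j
--         arr[i + 1], arr[high] = arr[high], arr[i + 1]
--         pi = i + 1
--         yield arr.copy(), pi, high
--         yield from _gen_qs(arr, low, pi - 1)
--         yield from _gen_qs(arr, pi + 1, high)
-- ===== SOURCE B (Python) =====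
-- def _gen_qs(arr, low, high):
--     # Iterative variant: explicit stack of (low, high) ranges replaces the recursion.
--     # The left subrange is pushed last so it is popped first, reproducing the
--     # recursive DFS order and the exact yield sequence.  Mutates arr in place
--     # exactly like the original.
--     stack = [(low, high)]
--     while stack:
--         lo, hi = stack.pop()
--         if lo < hi:
--             pivot = arr[hi]
--             i = lo - 1
--             j = lo
--             while j < hi:
--                 if arr[j] <= pivot:
--                     i += 1
--                     arr[i], arr[j] = arr[j], arr[i]
--                     yield arr.copy(), i, j
--                 j += 1
--             arr[i + 1], arr[hi] = arr[hi], arr[i + 1]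
--             pi = i + 1
--             yield arr.copy(), pi, hi
--             stack.append((pi + 1, hi))
--             stack.append((lo, pi - 1))
-- ===== Notes on version B (the rewrite author's own statement) =====
-- stated objective: alternative
-- what changed: Replaces the recursive generator with an iterative one driven by an explicit stack of (low, high) ranges, pushing the right subrange before the left so the pops reproduce the recursion's DFS order and yield sequence exactly.
import Mathlib
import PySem

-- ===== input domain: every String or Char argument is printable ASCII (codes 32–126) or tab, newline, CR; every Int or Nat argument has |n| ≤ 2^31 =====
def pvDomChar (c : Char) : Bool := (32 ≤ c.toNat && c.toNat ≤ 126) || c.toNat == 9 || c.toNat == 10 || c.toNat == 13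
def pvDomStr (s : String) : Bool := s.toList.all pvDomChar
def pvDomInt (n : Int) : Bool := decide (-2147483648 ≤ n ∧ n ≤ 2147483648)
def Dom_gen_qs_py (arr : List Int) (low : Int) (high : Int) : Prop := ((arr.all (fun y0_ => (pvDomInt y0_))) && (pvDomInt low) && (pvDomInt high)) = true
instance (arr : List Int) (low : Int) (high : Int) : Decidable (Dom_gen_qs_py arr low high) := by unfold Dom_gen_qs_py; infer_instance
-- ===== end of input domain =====

-- ===== PORT A =====
-- B re-implements A's recursive quicksort step generator as an explicit-stack iteration
-- with the same partition; equivalence is about the returned yield list (both Pythons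
-- mutate arr in place identically).
-- Shared index primitives: exact Python semantics (incl. negative-index wrap) wherever
-- Python does not raise; out-of-range accesses (IndexError, excluded by Pre_) default/no-op.
def pyGetZ (xs : List Int) (i : Int) : Int := PySem.List.pyGetD xs i 0

-- arr[i], arr[j] = arr[j], arr[i] : read both, then assign arr[i] := old arr[j], arr[j] := old arr[i]
def pySwapZ (xs : List Int) (i j : Int) : List Int :=
  PySem.List.pySetD (PySem.List.pySetD xs i (pyGetZ xs j)) j (pyGetZ xs i)

-- A's inner 'for j in range(low, high)' partition loop, as a fold over the range;
-- state = (arr, i, yields so far)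
def stepA (pivot : Int) (st : List Int × Int × List (List Int × Int × Int)) (j : Int) :
    List Int × Int × List (List Int × Int × Int) :=
  if pyGetZ st.1 j ≤ pivot then
    let arr' := pySwapZ st.1 (st.2.1 + 1) j
    (arr', st.2.1 + 1, st.2.2 ++ [(arr', st.2.1 + 1, j)])
  else st

-- the recursive generator, returning (final arr, list of yields); the Nat fuel is only a
-- structural termination guard (each recursive call strictly shrinks high - low, so the
-- fuel given by gen_qs_py below never runs out)
def gqAF : Nat → List Int → Int → Int → List Int × List (List Int × Int × Int)
  | 0, arr, _, _ => (arr, [])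
  | n + 1, arr, low, high =>
    if low < high then
      let pivot := pyGetZ arr high
      let r := (PySem.List.pyRange low high 1).foldl (stepA pivot) (arr, low - 1, [])
      let arr2 := pySwapZ r.1 (r.2.1 + 1) high
      let pi := r.2.1 + 1
      let r1 := gqAF n arr2 low (pi - 1)
      let r2 := gqAF n r1.1 (pi + 1) high
      (r2.1, r.2.2 ++ [(arr2, pi, high)] ++ r1.2 ++ r2.2)
    else
      (arr, [])

def gen_qs_py (arr : List Int) (low : Int) (high : Int) : List (List Int × Int × Int) :=
  (gqAF ((high - low).toNat + 1) arr low high).2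

-- ===== PORT B =====
-- B's inner 'while j < hi' partition loop; the fuel (hi - j).toNat counts the remaining
-- loop iterations exactly
def partBF : Nat → Int → Int → List Int → Int → Int → List (List Int × Int × Int) →
    List Int × Int × List (List Int × Int × Int)
  | 0, _, _, arr, i, _, acc => (arr, i, acc)
  | n + 1, pivot, hi, arr, i, j, acc =>
    if pyGetZ arr j ≤ pivot then
      let arr' := pySwapZ arr (i + 1) j
      partBF n pivot hi arr' (i + 1) (j + 1) (acc ++ [(arr', i + 1, j)])
    else
      partBF n pivot hi arr i (j + 1) acc

-- the stack loop: the list head is the stack top; pushing (pi+1, hi) then (lo, pi-1)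
-- makes the left subrange the next popped, as in Source B; the Nat fuel is only a
-- termination guard (processing a range of size s takes at most 2*s+1 iterations,
-- so the fuel given by gen_qs_py_alt below never runs out)
def stackBF : Nat → List Int → List (Int × Int) → List (List Int × Int × Int) →
    List (List Int × Int × Int)
  | 0, _, _, out => out
  | _ + 1, _, [], out => out
  | n + 1, arr, (lo, hi) :: rest, out =>
    if lo < hi then
      let pivot := pyGetZ arr hi
      let r := partBF (hi - lo).toNat pivot hi arr (lo - 1) lo []
      let arr2 := pySwapZ r.1 (r.2.1 + 1) hi
      let pi := r.2.1 + 1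
      stackBF n arr2 ((lo, pi - 1) :: (pi + 1, hi) :: rest) (out ++ r.2.2 ++ [(arr2, pi, hi)])
    else
      stackBF n arr rest out

def gen_qs_py_alt (arr : List Int) (low : Int) (high : Int) : List (List Int × Int × Int) :=
  stackBF (2 * (high - low).toNat + 1) arr [(low, high)] []

-- ===== PRECONDITION & SPEC =====
-- Pre_ is exactly where the Python A returns normally: with low < high every index the
-- algorithm touches lies in [low, high], so A returns iff the range is empty or
-- -len(arr) <= low and high < len(arr) (otherwise the first arr[high] / arr[j] raises
-- IndexError).  Negative in-range indices (Python wraparound) are admitted and ported exactly.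
def Pre_gen_qs_py (arr : List Int) (low : Int) (high : Int) : Prop :=
  high ≤ low ∨ (-(arr.length : Int) ≤ low ∧ high < (arr.length : Int))
instance (arr : List Int) (low : Int) (high : Int) : Decidable (Pre_gen_qs_py arr low high) := by unfold Pre_gen_qs_py; infer_instance

def pvWitness_gen_qs_py : List Int × Int × Int := ([3, 1, 2], 0, 2)

def Spec_gen_qs_py (arr : List Int) (low : Int) (high : Int) (out : List (List Int × Int × Int)) : Prop := out = gen_qs_py_alt arr low high
instance (arr : List Int) (low : Int) (high : Int) (out : List (List Int × Int × Int)) : Decidable (Spec_gen_qs_py arr low high out) := by unfold Spec_gen_qs_py; infer_instance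

-- ===== CLAIM (what is proved, stated in full; the proofs are below) =====
def Claim_equal_gen_qs_py : Prop := ∀ (arr : List Int) (low : Int) (high : Int), Dom_gen_qs_py arr low high → Pre_gen_qs_py arr low high → Spec_gen_qs_py arr low high (gen_qs_py arr low high)

-- ===== LEMMAS AND PROOFS =====

-- stepA moves i by 0 or 1
theorem stepA_i_bounds (pivot : Int) (st : List Int × Int × List (List Int × Int × Int))
    (j : Int) : st.2.1 ≤ (stepA pivot st j).2.1 ∧ (stepA pivot st j).2.1 ≤ st.2.1 + 1 := by
  unfold stepA
  split <;> simp

theorem foldA_i_bounds (pivot : Int) (js : List Int) :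
    ∀ st : List Int × Int × List (List Int × Int × Int),
      st.2.1 ≤ (js.foldl (stepA pivot) st).2.1 ∧
      (js.foldl (stepA pivot) st).2.1 ≤ st.2.1 + js.length := by
  induction js with
  | nil => intro st; simp
  | cons j js ih =>
    intro st
    have h1 := stepA_i_bounds pivot st j
    have h2 := ih (stepA pivot st j)
    simp only [List.foldl_cons, List.length_cons] at *
    omega

-- fuel-free (well-founded) version of A's recursion, used only in the proofs
def gqW (arr : List Int) (low high : Int) : List Int × List (List Int × Int × Int) :=
  if h : low < high then
    let pivot := pyGetZ arr high
    let r := (PySem.List.pyRange low high 1).foldl (stepA pivot) (arr, low - 1, [])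
    let arr2 := pySwapZ r.1 (r.2.1 + 1) high
    let pi := r.2.1 + 1
    let r1 := gqW arr2 low (pi - 1)
    let r2 := gqW r1.1 (pi + 1) high
    (r2.1, r.2.2 ++ [(arr2, pi, high)] ++ r1.2 ++ r2.2)
  else
    (arr, [])
termination_by (high - low).toNat
decreasing_by
  · have hb := foldA_i_bounds (pyGetZ arr high) (PySem.List.pyRange low high 1)
      (arr, low - 1, [])
    simp only [PySem.List.length_pyRange_one] at hb
    omega
  · have hb := foldA_i_bounds (pyGetZ arr high) (PySem.List.pyRange low high 1)
      (arr, low - 1, [])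
    simp only [PySem.List.length_pyRange_one] at hb
    omega

-- any sufficient fuel computes gqW
theorem gqAF_adequate : ∀ (n : Nat) (arr : List Int) (low high : Int),
    (high - low).toNat < n → gqAF n arr low high = gqW arr low high := by
  intro n
  induction n with
  | zero => intro arr low high hn; omega
  | succ n ih =>
    intro arr low high hn
    rw [gqAF, gqW]
    by_cases h : low < high
    · simp only [if_pos h, dif_pos h]
      have hb := foldA_i_bounds (pyGetZ arr high) (PySem.List.pyRange low high 1)
        (arr, low - 1, [])
      simp only [PySem.List.length_pyRange_one] at hb
      rw [ih _ low _ (by omega), ih _ _ high (by omega)]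
    · simp only [if_neg h, dif_neg h]

-- partBF's fuel moves i by at most fuel, never below its start
theorem partBF_i_bounds : ∀ (n : Nat) (pivot hi : Int) (arr : List Int) (i j : Int)
    (acc : List (List Int × Int × Int)),
    i ≤ (partBF n pivot hi arr i j acc).2.1 ∧
    (partBF n pivot hi arr i j acc).2.1 ≤ i + n := by
  intro n
  induction n with
  | zero => intro pivot hi arr i j acc; simp [partBF]
  | succ n ih =>
    intro pivot hi arr i j acc
    rw [partBF]
    by_cases h : pyGetZ arr j ≤ pivot
    · simp only [if_pos h]
      have := ih pivot hi (pySwapZ arr (i + 1) j) (i + 1) (j + 1)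
        (acc ++ [(pySwapZ arr (i + 1) j, i + 1, j)])
      omega
    · simp only [if_neg h]
      have := ih pivot hi arr i (j + 1) acc
      omega

-- A's fold over range(j, hi) computes the same (arr, i, acc) as B's while-loop recursion
theorem foldA_eq_partBF : ∀ (n : Nat) (pivot hi : Int) (arr : List Int) (i j : Int)
    (acc : List (List Int × Int × Int)), n = (hi - j).toNat →
    (PySem.List.pyRange j hi 1).foldl (stepA pivot) (arr, i, acc) =
      partBF n pivot hi arr i j acc := by
  intro n
  induction n with
  | zero =>
    intro pivot hi arr i j acc hn
    rw [PySem.List.pyRange_one_eq_nil (by omega), partBF]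
    simp
  | succ n ih =>
    intro pivot hi arr i j acc hn
    rw [PySem.List.pyRange_one_cons (by omega : j < hi), List.foldl_cons, partBF]
    unfold stepA
    by_cases h : pyGetZ arr j ≤ pivot
    · simp only [if_pos h]
      exact ih pivot hi _ _ (j + 1) _ (by omega)
    · simp only [if_neg h]
      exact ih pivot hi _ _ (j + 1) _ (by omega)

-- fuel-free (well-founded) version of B's stack loop, used only in the proofs
def stackW (arr : List Int) (stack : List (Int × Int))
    (out : List (List Int × Int × Int)) : List (List Int × Int × Int) :=
  match stack with
  | [] => out
  | (lo, hi) :: rest =>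
    if h : lo < hi then
      let pivot := pyGetZ arr hi
      let r := partBF (hi - lo).toNat pivot hi arr (lo - 1) lo []
      let arr2 := pySwapZ r.1 (r.2.1 + 1) hi
      let pi := r.2.1 + 1
      stackW arr2 ((lo, pi - 1) :: (pi + 1, hi) :: rest) (out ++ r.2.2 ++ [(arr2, pi, hi)])
    else
      stackW arr rest out
termination_by ((stack.map (fun p => (p.2 - p.1).toNat)).sum, stack.length)
decreasing_by
  · have hb := partBF_i_bounds (hi - lo).toNat (pyGetZ arr hi) hi arr (lo - 1) lo []
    simp only [List.map_cons, List.sum_cons, List.length_cons]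
    apply Prod.Lex.left
    omega
  · simp only [List.map_cons, List.sum_cons, List.length_cons]
    have h0 : (hi - lo).toNat = 0 := by omega
    rw [h0, Nat.zero_add]
    apply Prod.Lex.right
    omega

-- any fuel covering the worst-case iteration count computes stackW
theorem stackBF_adequate : ∀ (n : Nat) (stack : List (Int × Int)) (arr : List Int)
    (out : List (List Int × Int × Int)),
    (stack.map (fun p => 2 * (p.2 - p.1).toNat + 1)).sum ≤ n →
    stackBF n arr stack out = stackW arr stack out := by
  intro n
  induction n with
  | zero =>
    intro stack arr out hn
    match stack with
    | [] => rw [stackBF, stackW]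
    | p :: rest => simp at hn
  | succ n ih =>
    intro stack arr out hn
    match stack with
    | [] => rw [stackBF, stackW]
    | (lo, hi) :: rest =>
      rw [stackBF, stackW]
      simp only [List.map_cons, List.sum_cons] at hn
      by_cases h : lo < hi
      · simp only [if_pos h, dif_pos h]
        have hb := partBF_i_bounds (hi - lo).toNat (pyGetZ arr hi) hi arr (lo - 1) lo []
        apply ih
        simp only [List.map_cons, List.sum_cons]
        omega
      · simp only [if_neg h, dif_neg h]
        apply ih
        omega

-- processing the top range (lo, hi) on the stack produces gqW's yields and final array
theorem stackW_cons (n : Nat) :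
    ∀ (lo hi : Int), (hi - lo).toNat ≤ n →
      ∀ (arr : List Int) (rest : List (Int × Int)) (out : List (List Int × Int × Int)),
        stackW arr ((lo, hi) :: rest) out =
          stackW (gqW arr lo hi).1 rest (out ++ (gqW arr lo hi).2) := by
  induction n with
  | zero =>
    intro lo hi hn arr rest out
    have hge : ¬ lo < hi := by omega
    rw [stackW, gqW]
    simp [hge]
  | succ n ih =>
    intro lo hi hn arr rest out
    by_cases h : lo < hi
    · rw [stackW, gqW]
      simp only [dif_pos h]
      rw [← foldA_eq_partBF (hi - lo).toNat (pyGetZ arr hi) hi arr (lo - 1) lo [] rfl]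
      have hb := foldA_i_bounds (pyGetZ arr hi) (PySem.List.pyRange lo hi 1)
        (arr, lo - 1, [])
      simp only [PySem.List.length_pyRange_one] at hb
      set r := (PySem.List.pyRange lo hi 1).foldl (stepA (pyGetZ arr hi)) (arr, lo - 1, []) with hr
      set arr2 := pySwapZ r.1 (r.2.1 + 1) hi with ha2
      rw [ih lo (r.2.1 + 1 - 1) (by omega) arr2 ((r.2.1 + 1 + 1, hi) :: rest)]
      rw [ih (r.2.1 + 1 + 1) hi (by omega)]
      simp [List.append_assoc]
    · rw [stackW, gqW]
      simp [h]

-- ===== VERDICT (by name: the statement is the Claim_ definition above) =====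
theorem gen_qs_py_spec : Claim_equal_gen_qs_py := by
  intro arr low high _ _
  unfold Spec_gen_qs_py gen_qs_py gen_qs_py_alt
  rw [gqAF_adequate _ arr low high (by omega)]
  rw [stackBF_adequate _ [(low, high)] arr [] (by simp)]
  rw [stackW_cons (high - low).toNat low high le_rfl arr [] []]
  rw [stackW]
  simp
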